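-- pv_equiv track=rewrite | github.com/tukamilano/genetic_SKI | calculate/detect.py | detect_clause
-- ===== SOURCE A (Python) =====
-- def detect_clause(formula, pos):
--     if formula[pos] == "S":
--         return "S", 1
--     elif formula[pos] == "K":
--         return "K", 1
--     else:
--         a = 1
--         i = 0
--         while 0 < a:
--             if formula[pos+i] == "A":
--                 a += 1
--                 i += 1
--             else:
--                 a -= 1
--                 i += 1
--         return formula[pos:pos+i], i
-- ===== SOURCE B (Python) =====
-- def detect_clause(formula, pos):
--     c = formula[pos]
--     if c == "S":
--         return "S", 1
--     if c == "K":
--         return "K", 1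
--     if c == "A":
--         _, l1 = detect_clause(formula, pos + 1)
--         _, l2 = detect_clause(formula, pos + 1 + l1)
--         n = 1 + l1 + l2
--         return formula[pos:pos + n], n
--     return formula[pos:pos + 1], 1
-- ===== Notes on version B (the rewrite author's own statement) =====
-- stated objective: alternative
-- what changed: Replaces A's flat while-loop that counts an application balance with a self-recursive descent parser: an 'A' node recursively parses its two subterms and returns the slice of their combined length, any other character is a one-char leaf.
import Mathlib
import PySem

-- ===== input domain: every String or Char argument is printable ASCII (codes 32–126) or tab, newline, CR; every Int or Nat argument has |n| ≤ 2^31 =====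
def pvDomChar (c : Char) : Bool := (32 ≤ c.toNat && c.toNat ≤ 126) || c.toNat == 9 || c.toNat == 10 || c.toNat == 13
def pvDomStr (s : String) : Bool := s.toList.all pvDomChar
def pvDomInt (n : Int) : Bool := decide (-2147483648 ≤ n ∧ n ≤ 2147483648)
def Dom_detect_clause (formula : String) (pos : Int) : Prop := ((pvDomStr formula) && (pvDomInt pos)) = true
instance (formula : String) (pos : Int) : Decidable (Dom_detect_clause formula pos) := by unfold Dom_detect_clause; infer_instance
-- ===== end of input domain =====

-- B replaces A's flat application-balance counting loop by a self-recursive descent parser; equal return values on all inputs where A returns (Pre_).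

-- ===== PORT A =====
-- A's while loop: a = application balance, i = offset; fuel only makes it total
-- (the loop's index pos+i grows each step, so fuel 2*len+2 is never exhausted on inputs where Python returns).
def aLoop (cs : List Char) (pos : Int) (fuel : Nat) (a i : Int) : Option Int :=
  if a ≤ 0 then some i else
  match fuel with
  | 0 => none
  | f+1 =>
    match PySem.List.pyGet? cs (pos + i) with
    | none => none            -- IndexError
    | some c => if c = 'A' then aLoop cs pos f (a+1) (i+1) else aLoop cs pos f (a-1) (i+1)

def detect_clause (formula : String) (pos : Int) : String × Int :=
  let cs := formula.toList
  match PySem.List.pyGet? cs pos with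
  | none => ("", 0)           -- IndexError (outside Pre_)
  | some c =>
    if c = 'S' then ("S", 1)
    else if c = 'K' then ("K", 1)
    else
      match aLoop cs pos (2 * cs.length + 2) 1 0 with
      | none => ("", 0)       -- IndexError inside the loop (outside Pre_)
      | some i => (String.ofList (PySem.List.slice cs (some pos) (some (pos + i))), i)

-- ===== PORT B =====
-- Source B's self-recursive detect_clause, on the char list; fuel only makes it total
-- (recursion depth ≤ number of positions read ≤ 2*len on inputs where Python returns).
def bGo (cs : List Char) (fuel : Nat) (q : Int) : Option (List Char × Int) :=
  match fuel with
  | 0 => none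
  | f+1 =>
    match PySem.List.pyGet? cs q with
    | none => none            -- IndexError
    | some c =>
      if c = 'S' then some (['S'], 1)
      else if c = 'K' then some (['K'], 1)
      else if c = 'A' then
        match bGo cs f (q+1) with
        | none => none
        | some (_, l1) =>
          match bGo cs f (q+1+l1) with
          | none => none
          | some (_, l2) =>
            some (PySem.List.slice cs (some q) (some (q+(1+l1+l2))), 1+l1+l2)
      else some (PySem.List.slice cs (some q) (some (q+1)), 1)

def detect_clause_alt (formula : String) (pos : Int) : String × Int :=
  match bGo formula.toList (2 * formula.toList.length + 2) pos with
  | none => ("", 0)           -- IndexError / recursion failure (outside Pre_)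
  | some (t, n) => (String.ofList t, n)

-- ===== PRECONDITION & SPEC =====
-- the sequence of characters Python's wrap-around indexing reads from position pos onwards
def readSeq (cs : List Char) (pos : Int) : List Char :=
  if pos < 0 then cs.drop (cs.length - (-pos).toNat) ++ cs else cs.drop pos.toNat

-- Pre_ is exactly where Python's A returns: pos a valid (possibly negative) index and the
-- balance walk crosses zero, i.e. some prefix of the read sequence has one more non-'A' than 'A'.
def Pre_detect_clause (formula : String) (pos : Int) : Prop :=
  (-(formula.toList.length : Int) ≤ pos ∧ pos < formula.toList.length) ∧
  ∃ j ∈ List.range ((readSeq formula.toList pos).length + 1),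
    2 * (((readSeq formula.toList pos).take j).count 'A') + 1 = j

instance (formula : String) (pos : Int) : Decidable (Pre_detect_clause formula pos) := by
  unfold Pre_detect_clause; infer_instance

def pvWitness_detect_clause : String × Int := ("AKS", 0)

def Spec_detect_clause (formula : String) (pos : Int) (out : String × Int) : Prop := out = detect_clause_alt formula pos
instance (formula : String) (pos : Int) (out : String × Int) : Decidable (Spec_detect_clause formula pos out) := by unfold Spec_detect_clause; infer_instance

-- ===== CLAIM (what is proved, stated in full; the proofs are below) =====
def Claim_equal_detect_clause : Prop := ∀ (formula : String) (pos : Int), Dom_detect_clause formula pos → Pre_detect_clause formula pos → Spec_detect_clause formula pos (detect_clause formula pos)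

-- ===== LEMMAS AND PROOFS =====

-- list-level version of A's loop (consumes a list, returns how many chars it ate)
def loopL (a : Int) : List Char → Option Nat
  | [] => if a ≤ 0 then some 0 else none
  | c :: r => if a ≤ 0 then some 0 else (loopL (if c = 'A' then a+1 else a-1) r).map (· + 1)

lemma loopL_nonpos (a : Int) (l : List Char) (h : a ≤ 0) : loopL a l = some 0 := by
  cases l <;> simp [loopL, h]

-- list-level version of B's recursive descent (lengths only)
def parseL (fuel : Nat) (l : List Char) : Option Nat :=
  match fuel with
  | 0 => none
  | f+1 =>
    match l with
    | [] => none
    | c :: r =>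
      if c = 'A' then
        match parseL f r with
        | none => none
        | some l1 =>
          match parseL f (r.drop l1) with
          | none => none
          | some l2 => some (1 + l1 + l2)
      else some 1

-- Python's (wrapping) indexing from pos coincides with straight indexing into readSeq
lemma readSeq_get (cs : List Char) (pos : Int) (h : -(cs.length : Int) ≤ pos) (j : Nat) :
    PySem.List.pyGet? cs (pos + j) = (readSeq cs pos)[j]? := by
  unfold readSeq
  by_cases hneg : pos < 0
  · rw [if_pos hneg]
    have hm1 : 1 ≤ (-pos).toNat := by omega
    have hmlen : (-pos).toNat ≤ cs.length := by omega
    have hdl : (cs.drop (cs.length - (-pos).toNat)).length = (-pos).toNat := by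
      rw [List.length_drop]; omega
    by_cases hj : j < (-pos).toNat
    · have he : pos + j = -((((-pos).toNat - j : Nat)) : Int) := by omega
      rw [he, PySem.List.pyGet?_neg_natCast cs ((-pos).toNat - j) (by omega) (by omega)]
      rw [List.getElem?_append_left (by omega)]
      rw [List.getElem?_drop]
      congr 1
      omega
    · have he : pos + j = (((j - (-pos).toNat : Nat)) : Int) := by omega
      rw [he, PySem.List.pyGet?_natCast]
      rw [List.getElem?_append_right (by omega)]
      congr 1
      omega
  · rw [if_neg hneg]
    have he : pos + j = ((pos.toNat + j : Nat) : Int) := by push_cast; omega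
    rw [he, PySem.List.pyGet?_natCast, List.getElem?_drop]

lemma readSeq_drop_none (cs : List Char) (pos : Int) (j : Nat)
    (hg : (readSeq cs pos)[j]? = none) : (readSeq cs pos).drop j = [] := by
  refine List.drop_eq_nil_of_le ?_
  by_contra hc
  rw [List.getElem?_eq_getElem (by omega)] at hg
  simp at hg

lemma readSeq_drop_cons (cs : List Char) (pos : Int) (j : Nat) (c : Char)
    (hg : (readSeq cs pos)[j]? = some c) :
    (readSeq cs pos).drop j = c :: (readSeq cs pos).drop (j+1) := by
  rw [List.getElem?_eq_some_iff] at hg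
  obtain ⟨hlt, hv⟩ := hg
  rw [List.drop_eq_getElem_cons hlt, hv]

-- A's loop is the list-level loop on the read sequence
lemma aLoop_eq (cs : List Char) (pos : Int) (h : -(cs.length : Int) ≤ pos) :
    ∀ (fuel : Nat) (j : Nat) (a : Int), ((readSeq cs pos).length - j) + 1 ≤ fuel →
      aLoop cs pos fuel a (j : Int) =
        (loopL a ((readSeq cs pos).drop j)).map (fun (n : Nat) => ((j + n : Nat) : Int)) := by
  intro fuel
  induction fuel with
  | zero => intro j a hf; omega
  | succ f ih =>
    intro j a hf
    by_cases ha : a ≤ 0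
    · rw [aLoop, if_pos ha, loopL_nonpos a _ ha]
      simp
    · rw [aLoop, if_neg ha]
      rw [readSeq_get cs pos h j]
      cases hg : (readSeq cs pos)[j]? with
      | none =>
        rw [readSeq_drop_none cs pos j hg]
        simp [loopL, ha]
      | some c =>
        have hjlt : j < (readSeq cs pos).length := by
          rw [List.getElem?_eq_some_iff] at hg; exact hg.1
        have hd := readSeq_drop_cons cs pos j c hg
        have hcast : (j : Int) + 1 = ((j+1 : Nat) : Int) := by push_cast; ring
        have hfn : ((readSeq cs pos).length - (j+1)) + 1 ≤ f := by omega
        rw [hd, loopL, if_neg ha]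
        by_cases hc : c = 'A'
        · simp only [hc, if_pos]
          rw [hcast, ih (j+1) (a+1) hfn]
          cases loopL (a+1) ((readSeq cs pos).drop (j+1)) with
          | none => simp
          | some n => simp; omega
        · simp only [if_neg hc]
          rw [hcast, ih (j+1) (a-1) hfn]
          cases loopL (a-1) ((readSeq cs pos).drop (j+1)) with
          | none => simp
          | some n => simp; omega

-- B's recursion computes the list-level parser's length on the read sequence
lemma bGo_snd_eq (cs : List Char) (pos : Int) (h : -(cs.length : Int) ≤ pos) :
    ∀ (fuel : Nat) (j : Nat),
      Option.map Prod.snd (bGo cs fuel (pos + j)) =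
        (parseL fuel ((readSeq cs pos).drop j)).map (fun (n : Nat) => (n : Int)) := by
  intro fuel
  induction fuel with
  | zero => intro j; rw [bGo, parseL]; simp
  | succ f ih =>
    intro j
    rw [bGo]
    rw [readSeq_get cs pos h j]
    cases hg : (readSeq cs pos)[j]? with
    | none =>
      rw [readSeq_drop_none cs pos j hg, parseL]
      simp
    | some c =>
      have hd := readSeq_drop_cons cs pos j c hg
      rw [hd, parseL]
      by_cases hS : c = 'S'
      · simp [hS]
      by_cases hK : c = 'K'
      · simp [hK]
      by_cases hc : c = 'A'
      · simp only [hc, reduceIte]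
        have hcast1 : pos + (j : Int) + 1 = pos + ((j+1 : Nat) : Int) := by push_cast; ring
        have e1 := ih (j+1)
        rw [hcast1]
        cases hb1 : bGo cs f (pos + ((j+1 : Nat) : Int)) with
        | none =>
          rw [hb1] at e1
          cases h1 : parseL f ((readSeq cs pos).drop (j+1)) with
          | none => simp
          | some n1 => rw [h1] at e1; simp at e1
        | some p1 =>
          obtain ⟨t1, l1⟩ := p1
          rw [hb1] at e1
          cases h1 : parseL f ((readSeq cs pos).drop (j+1)) with
          | none => rw [h1] at e1; simp at e1
          | some n1 =>
            rw [h1] at e1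
            simp only [Option.map_some, Option.some_inj] at e1
            have e1' : l1 = (n1 : Int) := e1
            subst e1'
            dsimp only
            have hcast2 : pos + ((j+1 : Nat) : Int) + ((n1 : Nat) : Int)
                = pos + ((j+1+n1 : Nat) : Int) := by push_cast; ring
            rw [hcast2]
            have e2 := ih (j+1+n1)
            have hdd : (readSeq cs pos).drop (j+1+n1) = ((readSeq cs pos).drop (j+1)).drop n1 := by
              rw [List.drop_drop]
            rw [hdd] at e2
            cases hb2 : bGo cs f (pos + ((j+1+n1 : Nat) : Int)) with
            | none =>
              rw [hb2] at e2
              cases h2 : parseL f (((readSeq cs pos).drop (j+1)).drop n1) with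
              | none => simp
              | some n2 => rw [h2] at e2; simp at e2
            | some p2 =>
              obtain ⟨t2, l2⟩ := p2
              rw [hb2] at e2
              cases h2 : parseL f (((readSeq cs pos).drop (j+1)).drop n1) with
              | none => rw [h2] at e2; simp at e2
              | some n2 =>
                rw [h2] at e2
                simp only [Option.map_some, Option.some_inj] at e2
                have e2' : l2 = (n2 : Int) := e2
                subst e2'
                dsimp only
                simp
      · simp [hS, hK, hc]

-- one-step characterisation of bGo's string component on a non-S/K head
lemma bGo_fst (cs : List Char) (fuel : Nat) (q : Int) (c : Char) (t : List Char) (n : Int)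
    (hg : PySem.List.pyGet? cs q = some c) (hS : c ≠ 'S') (hK : c ≠ 'K')
    (hb : bGo cs fuel q = some (t, n)) :
    t = PySem.List.slice cs (some q) (some (q + n)) := by
  cases fuel with
  | zero => rw [bGo] at hb; simp at hb
  | succ f =>
    rw [bGo, hg] at hb
    simp only [if_neg hS, if_neg hK] at hb
    by_cases hc : c = 'A'
    · rw [if_pos hc] at hb
      cases hb1 : bGo cs f (q+1) with
      | none => rw [hb1] at hb; simp at hb
      | some p1 =>
        obtain ⟨t1, l1⟩ := p1
        rw [hb1] at hb
        dsimp only at hb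
        cases hb2 : bGo cs f (q+1+l1) with
        | none => rw [hb2] at hb; simp at hb
        | some p2 =>
          obtain ⟨t2, l2⟩ := p2
          rw [hb2] at hb
          dsimp only at hb
          simp only [Option.some_inj, Prod.mk.injEq] at hb
          obtain ⟨ht, hn⟩ := hb
          rw [← ht, ← hn]
    · rw [if_neg hc] at hb
      simp only [Option.some_inj, Prod.mk.injEq] at hb
      obtain ⟨ht, hn⟩ := hb
      rw [← ht, ← hn]

-- if the parser succeeds, the balance loop eats exactly the same number of characters
lemma parseL_loopL : ∀ (fuel : Nat) (l : List Char) (n : Nat), parseL fuel l = some n →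
    ∀ a : Int, 0 ≤ a → loopL (a+1) l = (loopL a (l.drop n)).map (· + n) := by
  intro fuel
  induction fuel with
  | zero => intro l n hp; rw [parseL] at hp; simp at hp
  | succ f ih =>
    intro l n hp a ha
    cases l with
    | nil => rw [parseL] at hp; simp at hp
    | cons c r =>
      rw [parseL] at hp
      by_cases hc : c = 'A'
      · rw [if_pos hc] at hp
        cases h1 : parseL f r with
        | none => rw [h1] at hp; simp at hp
        | some l1 =>
          rw [h1] at hp
          simp only [] at hp
          cases h2 : parseL f (r.drop l1) with
          | none => rw [h2] at hp; simp at hp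
          | some l2 =>
            rw [h2] at hp
            simp at hp
            have hn : n = 1 + l1 + l2 := by omega
            subst hn hc
            have e1 := ih r l1 h1 (a+1) (by omega)
            have e2 := ih (r.drop l1) l2 h2 a ha
            have hL : loopL (a+1) ('A' :: r) = (loopL (a+1+1) r).map (· + 1) := by
              rw [loopL, if_neg (by omega : ¬ (a+1 ≤ 0))]
              simp
            rw [hL, e1, e2]
            have hdrop : ('A' :: r).drop (1 + l1 + l2) = (r.drop l1).drop l2 := by
              rw [List.drop_drop]
              have : 1 + l1 + l2 = (l1 + l2) + 1 := by omega
              rw [this, List.drop_succ_cons]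
            rw [hdrop]
            cases loopL a ((r.drop l1).drop l2) with
            | none => simp
            | some m => simp; omega
      · rw [if_neg hc] at hp
        simp at hp
        have hn : n = 1 := by omega
        subst hn
        rw [loopL, if_neg (by omega : ¬ (a+1 ≤ 0))]
        simp [hc]

lemma parseL_loopL_one (fuel : Nat) (l : List Char) (n : Nat) (h : parseL fuel l = some n) :
    loopL 1 l = some n := by
  have h1 := parseL_loopL fuel l n h 0 le_rfl
  rw [loopL_nonpos 0 _ le_rfl] at h1
  simpa using h1

-- a parsed clause of length n has exactly (n-1)/2 'A's: one more leaf than applications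
lemma parseL_balance : ∀ (fuel : Nat) (l : List Char) (n : Nat), parseL fuel l = some n →
    n ≤ l.length ∧ 2 * ((l.take n).count 'A') + 1 = n := by
  intro fuel
  induction fuel with
  | zero => intro l n hp; rw [parseL] at hp; simp at hp
  | succ f ih =>
    intro l n hp
    cases l with
    | nil => rw [parseL] at hp; simp at hp
    | cons c r =>
      rw [parseL] at hp
      by_cases hc : c = 'A'
      · rw [if_pos hc] at hp
        cases h1 : parseL f r with
        | none => rw [h1] at hp; simp at hp
        | some l1 =>
          rw [h1] at hp
          simp only [] at hp
          cases h2 : parseL f (r.drop l1) with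
          | none => rw [h2] at hp; simp at hp
          | some l2 =>
            rw [h2] at hp
            simp at hp
            have hn : n = 1 + l1 + l2 := by omega
            subst hn hc
            obtain ⟨hb1, hc1⟩ := ih r l1 h1
            obtain ⟨hb2, hc2⟩ := ih (r.drop l1) l2 h2
            rw [List.length_drop] at hb2
            constructor
            · simp only [List.length_cons]
              omega
            · have ht : ('A' :: r).take (1 + l1 + l2) = 'A' :: (r.take l1 ++ (r.drop l1).take l2) := by
                have he : 1 + l1 + l2 = (l1 + l2) + 1 := by omega
                rw [he, List.take_succ_cons, List.take_add]
              rw [ht, List.count_cons, List.count_append]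
              simp only [beq_self_eq_true, if_pos]
              omega
      · rw [if_neg hc] at hp
        simp at hp
        have hn : n = 1 := by omega
        subst hn
        refine ⟨by simp, ?_⟩
        have ht : (c :: r).take 1 = [c] := by simp
        rw [ht]
        simp [hc]

-- while never crossing, the walk stays positive
lemma pos_of_nocross (l : List Char) :
    ∀ j : Nat, (∀ k, k ≤ j → 2 * ((l.take k).count 'A') + 1 ≠ k) →
      j ≤ 2 * ((l.take j).count 'A') := by
  intro j
  induction j with
  | zero => intro _; omega
  | succ j ih =>
    intro hno
    have h1 : j ≤ 2 * ((l.take j).count 'A') := ih (fun k hk => hno k (by omega))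
    have hmono : (l.take j).count 'A' ≤ (l.take (j+1)).count 'A' := by
      have hsub : List.Sublist (l.take j) (l.take (j+1)) := by
        have he : l.take j = (l.take (j+1)).take j := by
          rw [List.take_take]
          congr 1
          omega
        rw [he]
        exact List.take_sublist j (l.take (j+1))
      exact hsub.count_le 'A'
    have h2 := hno (j+1) le_rfl
    omega

-- no proper prefix of a parsed clause is balanced
lemma parseL_nocross : ∀ (fuel : Nat) (l : List Char) (n : Nat), parseL fuel l = some n →
    ∀ j, j < n → 2 * ((l.take j).count 'A') + 1 ≠ j := by
  intro fuel
  induction fuel with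
  | zero => intro l n hp; rw [parseL] at hp; simp at hp
  | succ f ih =>
    intro l n hp j hj
    cases l with
    | nil => rw [parseL] at hp; simp at hp
    | cons c r =>
      rw [parseL] at hp
      by_cases hc : c = 'A'
      · rw [if_pos hc] at hp
        cases h1 : parseL f r with
        | none => rw [h1] at hp; simp at hp
        | some l1 =>
          rw [h1] at hp
          simp only [] at hp
          cases h2 : parseL f (r.drop l1) with
          | none => rw [h2] at hp; simp at hp
          | some l2 =>
            rw [h2] at hp
            simp at hp
            have hn : n = 1 + l1 + l2 := by omega
            subst hn hc
            cases j with
            | zero => simp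
            | succ j' =>
              rw [List.take_succ_cons, List.count_cons]
              simp only [beq_self_eq_true, if_pos]
              rcases lt_trichotomy j' l1 with hlt | heq | hgt
              · have hno : ∀ k, k ≤ j' → 2 * ((r.take k).count 'A') + 1 ≠ k :=
                  fun k hk => ih r l1 h1 k (by omega)
                have := pos_of_nocross r j' hno
                omega
              · have := (parseL_balance f r l1 h1).2
                rw [heq]
                omega
              · have hj2 : j' - l1 < l2 := by omega
                have hsplit : r.take j' = r.take l1 ++ (r.drop l1).take (j' - l1) := by
                  have he : j' = l1 + (j' - l1) := by omega
                  rw [← List.take_add, ← he]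
                rw [hsplit, List.count_append]
                have hbal := (parseL_balance f r l1 h1).2
                have hnc := ih (r.drop l1) l2 h2 (j' - l1) hj2
                omega
      · rw [if_neg hc] at hp
        simp at hp
        have hn : n = 1 := by omega
        subst hn
        have hj0 : j = 0 := by omega
        subst hj0
        simp

-- discrete intermediate value theorem for ±1 walks
lemma ivt (f : Nat → Int) (hstep : ∀ k, f (k+1) = f k + 1 ∨ f (k+1) = f k - 1) :
    ∀ m, 0 < f 0 → f m ≤ 0 → ∃ k, k ≤ m ∧ f k = 0 := by
  intro m
  induction m with
  | zero => intro h0 hm; omega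
  | succ m ih =>
    intro h0 hm
    by_cases hfm : f m ≤ 0
    · obtain ⟨k, hk, hfk⟩ := ih h0 hfm
      exact ⟨k, by omega, hfk⟩
    · refine ⟨m+1, le_rfl, ?_⟩
      rcases hstep m with h | h <;> omega

-- a walk that reaches -1 (balance 2 exhausted) crosses 0 first
lemma walk_cross (r : List Char) (j1 : Nat) (hc : 2 * ((r.take j1).count 'A') + 2 = j1) :
    ∃ k, k ≤ j1 ∧ 2 * ((r.take k).count 'A') + 1 = k := by
  have hstep : ∀ k : Nat, (1 + 2 * (((r.take (k+1)).count 'A' : Int)) - (k+1 : Nat))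
        = (1 + 2 * (((r.take k).count 'A' : Int)) - k) + 1
      ∨ (1 + 2 * (((r.take (k+1)).count 'A' : Int)) - (k+1 : Nat))
        = (1 + 2 * (((r.take k).count 'A' : Int)) - k) - 1 := by
    intro k
    have hcnt : (r.take (k+1)).count 'A' = (r.take k).count 'A' + (r[k]?.toList).count 'A' := by
      rw [List.take_add_one, List.count_append]
    have hle : (r[k]?.toList).count 'A' ≤ 1 := by
      cases hrk : r[k]? with
      | none => simp
      | some x => by_cases hx : x = 'A' <;> simp [hx]
    omega
  have h0 : (0 : Int) < 1 + 2 * (((r.take 0).count 'A' : Int)) - (0 : Nat) := by simp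
  have hj : 1 + 2 * (((r.take j1).count 'A' : Int)) - (j1 : Nat) ≤ 0 := by omega
  obtain ⟨k, hk, hfk⟩ :=
    ivt (fun k : Nat => 1 + 2 * (((r.take k).count 'A' : Int)) - k) hstep j1 h0 hj
  have hfk' : 1 + 2 * (((r.take k).count 'A' : Int)) - (k : Nat) = 0 := hfk
  exact ⟨k, hk, by omega⟩

-- if some prefix is balanced, the parser succeeds (given enough fuel)
lemma parseL_total : ∀ (N : Nat) (l : List Char) (fuel : Nat), l.length ≤ N → l.length + 1 ≤ fuel →
    (∃ j, j ≤ l.length ∧ 2 * ((l.take j).count 'A') + 1 = j) → ∃ n, parseL fuel l = some n := by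
  intro N
  induction N with
  | zero =>
    intro l fuel hN _ hcr
    obtain ⟨j, hj, hcross⟩ := hcr
    have hl : l.length = 0 := by omega
    have hj0 : j = 0 := by omega
    subst hj0
    simp at hcross
  | succ N ih =>
    intro l fuel hN hfuel hcr
    cases l with
    | nil =>
      obtain ⟨j, hj, hcross⟩ := hcr
      simp at hj
      subst hj
      simp at hcross
    | cons c r =>
      obtain ⟨f, rfl⟩ : ∃ f, fuel = f + 1 := ⟨fuel - 1, by simp at hfuel ⊢; omega⟩
      by_cases hc : c = 'A'
      · subst hc
        obtain ⟨j, hj, hcross⟩ := hcr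
        cases j with
        | zero => simp at hcross
        | succ j1 =>
          rw [List.take_succ_cons, List.count_cons] at hcross
          simp only [beq_self_eq_true, if_pos] at hcross
          have hj1len : j1 ≤ r.length := by simp at hj; omega
          have hcr1 : 2 * ((r.take j1).count 'A') + 2 = j1 := by omega
          obtain ⟨k, hk, hkcross⟩ := walk_cross r j1 hcr1
          obtain ⟨l1, h1⟩ := ih r f (by simp at hN; omega)
            (by simp at hfuel; omega) ⟨k, by omega, hkcross⟩
          obtain ⟨hl1len, hbal1⟩ := parseL_balance f r l1 h1
          have hl1j1 : l1 ≤ j1 := by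
            by_contra hgt
            have hno : ∀ kk, kk ≤ j1 → 2 * ((r.take kk).count 'A') + 1 ≠ kk :=
              fun kk hkk => parseL_nocross f r l1 h1 kk (by omega)
            have := pos_of_nocross r j1 hno
            omega
          have hsplit : r.take j1 = r.take l1 ++ (r.drop l1).take (j1 - l1) := by
            have he : j1 = l1 + (j1 - l1) := by omega
            rw [← List.take_add, ← he]
          rw [hsplit, List.count_append] at hcr1
          have hcr2 : 2 * (((r.drop l1).take (j1 - l1)).count 'A') + 1 = j1 - l1 := by omega
          obtain ⟨l2, h2⟩ := ih (r.drop l1) f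
            (by rw [List.length_drop]; simp at hN; omega)
            (by rw [List.length_drop]; simp at hfuel; omega)
            ⟨j1 - l1, by rw [List.length_drop]; omega, hcr2⟩
          exact ⟨1 + l1 + l2, by simp [parseL, h1, h2]⟩
      · exact ⟨1, by simp [parseL, hc]⟩

-- ===== VERDICT (by name: the statement is the Claim_ definition above) =====
theorem detect_clause_spec : Claim_equal_detect_clause := by
  intro formula pos _ hpre
  unfold Spec_detect_clause
  obtain ⟨⟨hge, hlt⟩, j, hjr, hcross⟩ := hpre
  rw [List.mem_range] at hjr
  have hcex : ∃ c, PySem.List.pyGet? formula.toList pos = some c := by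
    cases hg : PySem.List.pyGet? formula.toList pos with
    | none =>
      rw [PySem.List.pyGet?_eq_none_iff] at hg
      exact absurd ⟨hge, hlt⟩ hg
    | some c => exact ⟨c, rfl⟩
  obtain ⟨c, hg⟩ := hcex
  by_cases hS : c = 'S'
  · subst hS
    have hb : bGo formula.toList (2 * formula.toList.length + 2) pos = some (['S'], 1) := by
      rw [bGo, hg]
      simp
    simp only [detect_clause, detect_clause_alt, hg, hb, reduceIte]
  · by_cases hK : c = 'K'
    · subst hK
      have hb : bGo formula.toList (2 * formula.toList.length + 2) pos = some (['K'], 1) := by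
        rw [bGo, hg]
        simp
      simp only [detect_clause, detect_clause_alt, hg, hb, reduceIte]
      decide
    · have hseqlen : (readSeq formula.toList pos).length ≤ 2 * formula.toList.length := by
        unfold readSeq
        split
        · rw [List.length_append, List.length_drop]; omega
        · rw [List.length_drop]; omega
      have hjlen : j ≤ (readSeq formula.toList pos).length := by omega
      obtain ⟨n, hp⟩ := parseL_total (readSeq formula.toList pos).length
        (readSeq formula.toList pos) (2 * formula.toList.length + 2) le_rfl (by omega)
        ⟨j, hjlen, hcross⟩
      -- B's side: bGo succeeds with length n and the slice as its string
      have hsnd := bGo_snd_eq formula.toList pos hge (2 * formula.toList.length + 2) 0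
      simp only [Nat.cast_zero, add_zero, List.drop_zero] at hsnd
      rw [hp, Option.map_some] at hsnd
      obtain ⟨p, hb⟩ : ∃ p, bGo formula.toList (2 * formula.toList.length + 2) pos = some p := by
        cases hbb : bGo formula.toList (2 * formula.toList.length + 2) pos with
        | none => rw [hbb] at hsnd; simp at hsnd
        | some p => exact ⟨p, rfl⟩
      obtain ⟨t, m⟩ := p
      rw [hb, Option.map_some, Option.some_inj] at hsnd
      have hm : m = (n : Int) := hsnd
      subst hm
      have ht := bGo_fst formula.toList (2 * formula.toList.length + 2) pos c t (n : Int) hg hS hK hb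
      -- A's side: aLoop returns n
      have hloop : aLoop formula.toList pos (2 * formula.toList.length + 2) 1 0 = some (n : Int) := by
        have h0 := aLoop_eq formula.toList pos hge (2 * formula.toList.length + 2) 0 1 (by omega)
        simp only [Nat.cast_zero, List.drop_zero] at h0
        rw [h0, parseL_loopL_one _ _ _ hp, Option.map_some]
        simp
      simp only [detect_clause, detect_clause_alt, hg, if_neg hS, if_neg hK, hloop, hb, ht]
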